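-- pv_equiv track=rewrite | github.com/686f6c61/Domain-Finder | domain_finder.py | generate_domains_multiple
-- ===== SOURCE A (Python) =====
-- import string
--
-- def generate_domains(length=3, tld=".com"):
--     """
--     Generate all possible letter combinations for a given TLD.
--
--     Args:
--         length (int): Domain length (3 or 4 letters)
--         tld (str): Top-level domain (e.g., '.com')
--
--     Returns:
--         list: All possible domain combinations
--
--     Complexity:
--         O(26^length) - Exponential growth with domain length
--         - 3 letters: 26^3 = 17,576 combinations
--         - 4 letters: 26^4 = 456,976 combinations
--     """
--     letters = string.ascii_lowercase
--     domains = []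
--
--     if length == 3:
--         # Triple nested loop for 3-letter combinations
--         for a in letters:
--             for b in letters:
--                 for c in letters:
--                     domains.append(f"{a}{b}{c}{tld}")
--     elif length == 4:
--         # Quadruple nested loop for 4-letter combinations
--         for a in letters:
--             for b in letters:
--                 for c in letters:
--                     for d in letters:
--                         domains.append(f"{a}{b}{c}{d}{tld}")
--
--     return domains
--
-- def generate_domains_multiple(length=3, tlds=None):
--     """
--     Generate domain combinations for multiple TLDs.
--
--     Args:
--         length (int): Domain length (3 or 4 letters)
--         tlds (list): List of TLD strings, defaults to ['.com']
--
--     Returns: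
--         list: All domain combinations across all specified TLDs
--
--     Memory Consideration:
--         For 4 letters + all 50 TLDs: 456,976 * 50 = 22,848,800 domains
--         Uses streaming approach to avoid memory overload.
--     """
--     if tlds is None:
--         tlds = [".com"]
--
--     all_domains = []
--     for tld in tlds:
--         domains = generate_domains(length, tld)
--         all_domains.extend(domains)
--
--     return all_domains
-- ===== SOURCE B (Python) =====
-- def generate_domains_multiple(length=3, tlds=None):
--     if tlds is None:
--         tlds = [".com"]
--     if length not in (3, 4):
--         return []
--     n = 26 ** length
--     out = []
--     for tld in tlds:
--         for i in range(n):
--             s = ""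
--             x = i
--             for _ in range(length):
--                 s = chr(97 + x % 26) + s
--                 x //= 26
--             out.append(s + tld)
--     return out
-- ===== Notes on version B (the rewrite author's own statement) =====
-- stated objective: alternative
-- what changed: Replaces A's two hard-coded nests of per-position letter loops (one nest per supported length) with a single numeric counter over range(26**length) whose value is decoded into base-26 letter digits, msb first, so one uniform loop handles both lengths and yields the identical lexicographic sequence.
import Mathlib
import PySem

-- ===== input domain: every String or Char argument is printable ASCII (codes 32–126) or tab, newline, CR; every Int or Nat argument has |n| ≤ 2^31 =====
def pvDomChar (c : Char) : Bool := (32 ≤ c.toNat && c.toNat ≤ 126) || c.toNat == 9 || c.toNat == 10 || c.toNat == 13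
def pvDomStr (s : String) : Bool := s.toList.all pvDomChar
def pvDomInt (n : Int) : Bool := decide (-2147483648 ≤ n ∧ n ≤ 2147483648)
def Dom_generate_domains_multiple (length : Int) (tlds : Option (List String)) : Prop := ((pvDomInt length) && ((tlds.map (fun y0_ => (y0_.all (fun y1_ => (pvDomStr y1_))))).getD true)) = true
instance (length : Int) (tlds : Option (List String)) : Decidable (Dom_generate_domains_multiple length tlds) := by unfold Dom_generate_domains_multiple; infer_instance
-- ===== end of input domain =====

-- B replaces A's two hard-coded nests of per-position letter loops by one numeric
-- counter over range(26**length) decoded into base-26 letters (objective: alternative).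

-- ===== PORT A =====
-- string.ascii_lowercase
def pvLetters : List Char :=
  ['a','b','c','d','e','f','g','h','i','j','k','l','m',
   'n','o','p','q','r','s','t','u','v','w','x','y','z']

def generate_domains (length : Int) (tld : String) : List String :=
  if length = 3 then
    pvLetters.foldl (fun acc a =>
      pvLetters.foldl (fun acc b =>
        pvLetters.foldl (fun acc c =>
          acc ++ [String.mk ([a, b, c] ++ tld.toList)]) acc) acc) []
  else if length = 4 then
    pvLetters.foldl (fun acc a =>
      pvLetters.foldl (fun acc b =>
        pvLetters.foldl (fun acc c =>
          pvLetters.foldl (fun acc d =>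
            acc ++ [String.mk ([a, b, c, d] ++ tld.toList)]) acc) acc) acc) []
  else []

def generate_domains_multiple (length : Int) (tlds : Option (List String)) : List String :=
  (tlds.getD [".com"]).foldl (fun acc tld => acc ++ generate_domains length tld) []

-- ===== PORT B =====
-- the inner `for _ in range(length): s = chr(97 + x % 26) + s; x //= 26` loop
def altDigitsLoop : Nat → Int → List Char → List Char
  | 0, _, s => s
  | k+1, x, s =>
      altDigitsLoop k (PySem.Int.floordiv x 26)
        (Char.ofNat (97 + (PySem.Int.mod x 26)).toNat :: s)

def generate_domains_multiple_alt (length : Int) (tlds : Option (List String)) : List String :=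
  if length = 3 ∨ length = 4 then
    (tlds.getD [".com"]).foldl (fun acc tld =>
      (PySem.List.pyRange 0 ((26 : Int) ^ length.toNat) 1).foldl (fun acc i =>
        acc ++ [String.mk (altDigitsLoop length.toNat i [] ++ tld.toList)]) acc) []
  else []

-- ===== PRECONDITION & SPEC =====
def Spec_generate_domains_multiple (length : Int) (tlds : Option (List String)) (out : List String) : Prop := out = generate_domains_multiple_alt length tlds
instance (length : Int) (tlds : Option (List String)) (out : List String) : Decidable (Spec_generate_domains_multiple length tlds out) := by unfold Spec_generate_domains_multiple; infer_instance

-- ===== CLAIM (what is proved, stated in full; the proofs are below) =====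
def Claim_equal_generate_domains_multiple : Prop := ∀ (length : Int) (tlds : Option (List String)), Dom_generate_domains_multiple length tlds → Spec_generate_domains_multiple length tlds (generate_domains_multiple length tlds)

-- ===== LEMMAS AND PROOFS =====

-- msb-first base-26 digit string of m, over Nat
def natDigits : Nat → Nat → List Char
  | 0, _ => []
  | k+1, m => natDigits k (m / 26) ++ [Char.ofNat (97 + m % 26)]

theorem altDigitsLoop_eq (k : Nat) : ∀ (m : Nat) (s : List Char),
    altDigitsLoop k (m : Int) s = natDigits k m ++ s := by
  induction k with
  | zero => intro m s; simp [altDigitsLoop, natDigits]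
  | succ k ih =>
      intro m s
      rw [altDigitsLoop,
        show PySem.Int.floordiv (m : Int) 26 = ((m / 26 : Nat) : Int) from by
          exact_mod_cast PySem.Int.floordiv_natCast m 26,
        show PySem.Int.mod (m : Int) 26 = ((m % 26 : Nat) : Int) from by
          exact_mod_cast PySem.Int.mod_natCast m 26,
        ih,
        show ((97 : Int) + ((m % 26 : Nat) : Int)).toNat = 97 + m % 26 from by omega]
      rw [natDigits]
      simp

theorem natDigits_split (k : Nat) : ∀ (d r : Nat), r < 26 ^ k →
    natDigits (k+1) (d * 26 ^ k + r) = Char.ofNat (97 + d % 26) :: natDigits k r := by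
  induction k with
  | zero =>
      intro d r hr
      interval_cases r
      simp [natDigits]
  | succ k ih =>
      intro d r hr
      have hdiv : (d * 26 ^ (k+1) + r) / 26 = d * 26 ^ k + r / 26 := by
        rw [pow_succ]
        rw [show d * (26 ^ k * 26) + r = r + d * 26 ^ k * 26 by ring]
        rw [Nat.add_mul_div_right _ _ (by norm_num)]
        omega
      have hmod : (d * 26 ^ (k+1) + r) % 26 = r % 26 := by
        have : 26 ∣ d * 26 ^ (k+1) := by
          exact Dvd.dvd.mul_left (dvd_pow_self 26 (Nat.succ_ne_zero k)) d
        omega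
      have hr' : r / 26 < 26 ^ k := by
        rw [Nat.div_lt_iff_lt_mul (by norm_num)]
        calc r < 26 ^ (k+1) := hr
        _ = 26 ^ k * 26 := pow_succ 26 k
      show natDigits (k+1) ((d * 26 ^ (k+1) + r) / 26) ++ [Char.ofNat (97 + (d * 26 ^ (k+1) + r) % 26)] = _
      rw [hdiv, hmod, ih d (r / 26) hr']
      simp [natDigits]

-- combinations of k letters, msb first, in A's lexicographic order
def combos : Nat → List (List Char)
  | 0 => [[]]
  | k+1 => pvLetters.flatMap (fun a => (combos k).map (fun cs => a :: cs))

theorem pvLetters_eq : pvLetters = (List.range 26).map (fun d => Char.ofNat (97 + d)) := by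
  decide

theorem range_mul_flat {α : Type} (a b : Nat) (f : Nat → α) :
    (List.range (a * b)).map f
      = (List.range a).flatMap (fun d => (List.range b).map (fun r => f (d * b + r))) := by
  induction a with
  | zero => simp
  | succ a ih =>
      rw [Nat.succ_mul, List.range_add, List.range_succ]
      simp [ih, List.map_map, Function.comp_def]

theorem range_map_natDigits (k : Nat) :
    (List.range (26 ^ k)).map (natDigits k) = combos k := by
  induction k with
  | zero => simp [combos, natDigits]
  | succ k ih =>
      rw [pow_succ, mul_comm, range_mul_flat, combos, pvLetters_eq, List.flatMap_map]
      apply List.flatMap_congr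
      intro d hd
      have hd' : d < 26 := List.mem_range.mp hd
      rw [← ih, List.map_map]
      apply List.map_congr_left
      intro r hr
      have hr' : r < 26 ^ k := List.mem_range.mp hr
      simp [natDigits_split k d r hr', Nat.mod_eq_of_lt hd']

-- B's per-tld inner loop, as a map over the decoded counters
theorem per_tld_eq (k : Nat) (tld : String) :
    (PySem.List.pyRange 0 ((26 : Int) ^ k) 1).map
        (fun i => String.mk (altDigitsLoop k i [] ++ tld.toList))
      = (combos k).map (fun cs => String.mk (cs ++ tld.toList)) := by
  have hc : ((26 : Int) ^ k) = ((26 ^ k : Nat) : Int) := by push_cast; ring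
  have hn : (((26 : Int) ^ k - 0)).toNat = 26 ^ k := by
    rw [sub_zero, hc, Int.toNat_natCast]
  rw [PySem.List.pyRange_one, hn, List.map_map]
  rw [← range_map_natDigits, List.map_map]
  apply List.map_congr_left
  intro m _
  simp [altDigitsLoop_eq]

theorem flatMap_single {α β : Type} (l : List α) (f : α → β) :
    l.flatMap (fun x => [f x]) = l.map f := by
  induction l with
  | nil => rfl
  | cons a l ih => simp [List.flatMap_cons, ih]

theorem generate_domains_3 (tld : String) :
    generate_domains 3 tld = (combos 3).map (fun cs => String.mk (cs ++ tld.toList)) := by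
  unfold generate_domains
  rw [if_pos rfl]
  simp only [PySem.List.foldl_append_singleton_eq_map, PySem.List.foldl_append_eq_flatMap,
    List.nil_append]
  simp [combos, List.map_flatMap, List.map_map, flatMap_single, Function.comp_def]

theorem generate_domains_4 (tld : String) :
    generate_domains 4 tld = (combos 4).map (fun cs => String.mk (cs ++ tld.toList)) := by
  unfold generate_domains
  rw [if_neg (by norm_num), if_pos rfl]
  simp only [PySem.List.foldl_append_singleton_eq_map, PySem.List.foldl_append_eq_flatMap,
    List.nil_append]
  simp [combos, List.map_flatMap, List.map_map, flatMap_single, Function.comp_def]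

-- B's outer loop over tlds, as a flatMap
theorem alt_fold_eq (k : Nat) (ts : List String) :
    ts.foldl (fun acc tld =>
        (PySem.List.pyRange 0 ((26 : Int) ^ k) 1).foldl (fun acc i =>
          acc ++ [String.mk (altDigitsLoop k i [] ++ tld.toList)]) acc) []
      = ts.flatMap (fun tld =>
          (PySem.List.pyRange 0 ((26 : Int) ^ k) 1).map
            (fun i => String.mk (altDigitsLoop k i [] ++ tld.toList))) := by
  suffices h : ∀ acc : List String, ts.foldl (fun acc tld =>
        (PySem.List.pyRange 0 ((26 : Int) ^ k) 1).foldl (fun acc i =>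
          acc ++ [String.mk (altDigitsLoop k i [] ++ tld.toList)]) acc) acc
      = acc ++ ts.flatMap (fun tld =>
          (PySem.List.pyRange 0 ((26 : Int) ^ k) 1).map
            (fun i => String.mk (altDigitsLoop k i [] ++ tld.toList))) by
    simpa using h []
  induction ts with
  | nil => intro acc; simp
  | cons t ts ih =>
      intro acc
      simp only [List.foldl_cons, List.flatMap_cons]
      rw [PySem.List.foldl_append_singleton_eq_map, ih, List.append_assoc]

-- ===== VERDICT (by name: the statement is the Claim_ definition above) =====
theorem generate_domains_multiple_spec : Claim_equal_generate_domains_multiple := by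
  intro length tlds _
  unfold Spec_generate_domains_multiple generate_domains_multiple generate_domains_multiple_alt
  rw [PySem.List.foldl_append_eq_flatMap, List.nil_append]
  by_cases h3 : length = 3
  · subst h3
    rw [if_pos (Or.inl rfl), alt_fold_eq]
    apply List.flatMap_congr
    intro tld _
    rw [generate_domains_3, per_tld_eq]
    rfl
  · by_cases h4 : length = 4
    · subst h4
      rw [if_pos (Or.inr rfl), alt_fold_eq]
      apply List.flatMap_congr
      intro tld _
      rw [generate_domains_4, per_tld_eq]
      rfl
    · rw [if_neg (by tauto)]
      have hz : ∀ tld : String, generate_domains length tld = [] := by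
        intro tld
        unfold generate_domains
        rw [if_neg h3, if_neg h4]
      simp [hz]
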